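-- pv_equiv track=rewrite | github.com/aguscurii05/IP-Algo-I | Parciales/SegundoParcial/Parcial 3 (2024)/Parcial3.py | subsecuencia_mas_larga
-- ===== SOURCE A (Python) =====
-- def subseq(pacientes:list[str])->list[(int,int)]:
--     res=[]
--     j:int=0
--     while j<(len(pacientes)):
--         cont=0
--         if pacientes[j]=="perro": #si la palabra es perro chequea cuantas de las palabras siguientes son perro
--             ind=j
--             while j<len(pacientes) and pacientes[j]=="perro":
--                 cont+=1
--                 j+=1
--             res+=[(ind,cont)]
--         elif pacientes[j]=="gato": #si la palabra es gato chequea cuantas de las palabras siguientes son gato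
--             ind=j
--             while j<len(pacientes) and pacientes[j]=="gato":
--                 cont+=1
--                 j+=1
--             res+=[(ind,cont)]
--         else:
--             j+=1
--     return res
--
-- def subsecuencia_mas_larga(tipos_de_pacientes_atendidos:list[str])->int:
--     subsecuencias=subseq(tipos_de_pacientes_atendidos)
--     valmax=0
--     res=0
--     for subsec in subsecuencias:
--         if subsec[1]>valmax:
--             valmax=subsec[1]
--             res=subsec[0]
--     return res
-- ===== SOURCE B (Python) =====
-- def subsecuencia_mas_larga(tipos_de_pacientes_atendidos: list[str]) -> int:
--     best_len = 0
--     best_start = 0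
--     cur_len = 0
--     cur_start = 0
--     prev = None
--     for i, t in enumerate(tipos_de_pacientes_atendidos):
--         if t == "perro" or t == "gato":
--             if prev == t:
--                 cur_len += 1
--             else:
--                 cur_len = 1
--                 cur_start = i
--             if cur_len > best_len:
--                 best_len = cur_len
--                 best_start = cur_start
--         else:
--             cur_len = 0
--         prev = t
--     return best_start
-- ===== Notes on version B (the rewrite author's own statement) =====
-- stated objective: simpler
-- what changed: Replaces A's two-phase approach (build a list of (start,length) runs with nested while loops, then scan it for the maximum) by a single linear pass that maintains current-run and best-run state, never materialising the run list.
import Mathlib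
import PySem

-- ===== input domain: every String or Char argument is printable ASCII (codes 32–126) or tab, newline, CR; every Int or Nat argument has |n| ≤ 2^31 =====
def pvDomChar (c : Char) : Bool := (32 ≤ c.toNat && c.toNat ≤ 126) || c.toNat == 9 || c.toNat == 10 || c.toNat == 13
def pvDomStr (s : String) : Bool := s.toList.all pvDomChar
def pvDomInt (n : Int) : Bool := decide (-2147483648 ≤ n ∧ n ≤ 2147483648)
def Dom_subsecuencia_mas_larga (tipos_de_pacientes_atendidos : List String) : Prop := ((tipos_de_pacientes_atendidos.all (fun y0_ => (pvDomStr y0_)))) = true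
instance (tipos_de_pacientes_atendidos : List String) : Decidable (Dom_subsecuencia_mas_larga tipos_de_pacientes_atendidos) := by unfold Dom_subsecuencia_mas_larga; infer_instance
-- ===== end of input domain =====

-- B replaces A's run-list construction + max scan by one linear pass with current/best state (simpler, same O(n) cost).

-- ===== PORT A =====
-- inner `while j<len and pacientes[j]==w: cont+=1; j+=1` — length of the constant prefix equal to w
def pvRunLen (w : String) : List String → Nat
  | [] => 0
  | x :: xs => if x = w then pvRunLen w xs + 1 else 0

-- outer while of `subseq`: the list of (start index, length) of maximal perro/gato runs
def pvSubseq (l : List String) (j : Int) : List (Int × Int) :=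
  match l with
  | [] => []
  | x :: xs =>
    if x = "perro" then
      let c := pvRunLen "perro" (x :: xs)
      (j, (c : Int)) :: pvSubseq ((x :: xs).drop c) (j + c)
    else if x = "gato" then
      let c := pvRunLen "gato" (x :: xs)
      (j, (c : Int)) :: pvSubseq ((x :: xs).drop c) (j + c)
    else pvSubseq xs (j + 1)
  termination_by l.length
  decreasing_by
  · simp_all [pvRunLen]
  · simp_all [pvRunLen]
  · simp

-- the `for subsec in subsecuencias` fold: accumulator (valmax, res)
def pvMaxFold (subs : List (Int × Int)) (acc : Int × Int) : Int × Int :=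
  subs.foldl (fun a p => if p.2 > a.1 then (p.2, p.1) else a) acc

def subsecuencia_mas_larga (tipos_de_pacientes_atendidos : List String) : Int :=
  (pvMaxFold (pvSubseq tipos_de_pacientes_atendidos 0) (0, 0)).2

-- ===== PORT B =====
-- `for i, t in enumerate(l)` with state (best_len bl, best_start bs, cur_len cl, cur_start cs, prev)
def pvLoopB (l : List String) (i bl bs cl cs : Int) (prev : Option String) : Int :=
  match l with
  | [] => bs
  | t :: rest =>
    if t = "perro" ∨ t = "gato" then
      if prev = some t then
        if cl + 1 > bl then pvLoopB rest (i + 1) (cl + 1) cs (cl + 1) cs (some t)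
        else pvLoopB rest (i + 1) bl bs (cl + 1) cs (some t)
      else
        if (1 : Int) > bl then pvLoopB rest (i + 1) 1 i 1 i (some t)
        else pvLoopB rest (i + 1) bl bs 1 i (some t)
    else pvLoopB rest (i + 1) bl bs 0 cs (some t)

def subsecuencia_mas_larga_alt (tipos_de_pacientes_atendidos : List String) : Int :=
  pvLoopB tipos_de_pacientes_atendidos 0 0 0 0 0 none

-- ===== PRECONDITION & SPEC =====
def Spec_subsecuencia_mas_larga (tipos_de_pacientes_atendidos : List String) (out : Int) : Prop := out = subsecuencia_mas_larga_alt tipos_de_pacientes_atendidos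
instance (tipos_de_pacientes_atendidos : List String) (out : Int) : Decidable (Spec_subsecuencia_mas_larga tipos_de_pacientes_atendidos out) := by unfold Spec_subsecuencia_mas_larga; infer_instance

-- ===== CLAIM (what is proved, stated in full; the proofs are below) =====
def Claim_equal_subsecuencia_mas_larga : Prop := ∀ (tipos_de_pacientes_atendidos : List String), Dom_subsecuencia_mas_larga tipos_de_pacientes_atendidos → Spec_subsecuencia_mas_larga tipos_de_pacientes_atendidos (subsecuencia_mas_larga tipos_de_pacientes_atendidos)

-- ===== LEMMAS AND PROOFS =====

theorem pvRunLen_drop_head (w : String) (l : List String) :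
    ∀ x, (l.drop (pvRunLen w l)).head? = some x → x ≠ w := by
  induction l with
  | nil => simp
  | cons y ys ih =>
    intro x hx
    by_cases hy : y = w
    · rw [show pvRunLen w (y :: ys) = pvRunLen w ys + 1 from by simp [pvRunLen, hy],
        List.drop_succ_cons] at hx
      exact ih x hx
    · rw [show pvRunLen w (y :: ys) = 0 from by simp [pvRunLen, hy], List.drop_zero,
        List.head?_cons, Option.some.injEq] at hx
      rw [← hx]; exact hy

-- B over a constant run of w: cur length goes from m to m + runLen, best updated with strict >.
theorem pvLoopB_run (w : String) (hw : w = "perro" ∨ w = "gato") :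
    ∀ (l : List String) (j bl bs m : Int), 0 < m →
    pvLoopB l (j + m) (max bl m) (if m > bl then j else bs) m j (some w) =
    pvLoopB (l.drop (pvRunLen w l)) (j + m + pvRunLen w l)
      (max bl (m + pvRunLen w l)) (if m + pvRunLen w l > bl then j else bs)
      (m + pvRunLen w l) j (some w) := by
  intro l
  induction l with
  | nil => intro j bl bs m hm; simp [pvRunLen]
  | cons t rest ih =>
    intro j bl bs m hm
    by_cases ht : t = w
    · subst ht
      rw [show pvRunLen t (t :: rest) = pvRunLen t rest + 1 from by simp [pvRunLen],
        List.drop_succ_cons]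
      conv_lhs => rw [pvLoopB]
      rw [if_pos hw, if_pos rfl]
      push_cast
      by_cases hgt : m + 1 > bl
      · rw [if_pos (show m + 1 > max bl m by omega)]
        have h := ih j bl bs (m + 1) (by omega)
        rw [show max bl (m + 1) = m + 1 by omega, if_pos hgt] at h
        rw [show j + m + 1 = j + (m + 1) by ring,
          show m + ((pvRunLen t rest : Int) + 1) = m + 1 + pvRunLen t rest by ring,
          show j + m + ((pvRunLen t rest : Int) + 1) = j + (m + 1) + pvRunLen t rest by ring]
        exact h
      · rw [if_neg (show ¬ (m + 1 > max bl m) by omega)]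
        have h := ih j bl bs (m + 1) (by omega)
        rw [show max bl (m + 1) = max bl m by omega, if_neg hgt] at h
        rw [if_neg (show ¬ (m > bl) by omega)]
        rw [show j + m + 1 = j + (m + 1) by ring,
          show m + ((pvRunLen t rest : Int) + 1) = m + 1 + pvRunLen t rest by ring,
          show j + m + ((pvRunLen t rest : Int) + 1) = j + (m + 1) + pvRunLen t rest by ring]
        exact h
    · rw [show pvRunLen w (t :: rest) = 0 from by simp [pvRunLen, ht]]
      simp

theorem pvMaxFold_cons (j c bl bs : Int) (S : List (Int × Int)) :
    pvMaxFold ((j, c) :: S) (bl, bs) =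
    pvMaxFold S (max bl c, if c > bl then j else bs) := by
  unfold pvMaxFold
  rw [List.foldl_cons]
  by_cases hgt : c > bl
  · rw [show max bl c = c by omega]
    simp [hgt]
  · rw [show max bl c = bl by omega]
    simp [hgt]

-- main invariant: B's loop from state (bl,bs,…) equals A's fold over the remaining runs seeded with (bl,bs)
theorem pvMain : ∀ (n : Nat) (l : List String), l.length ≤ n →
    ∀ (j bl bs cl cs : Int) (prev : Option String),
    (∀ w, l.head? = some w → (w = "perro" ∨ w = "gato") → prev ≠ some w) →
    pvLoopB l j bl bs cl cs prev = (pvMaxFold (pvSubseq l j) (bl, bs)).2 := by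
  intro n
  induction n with
  | zero =>
    intro l hl
    have : l = [] := by cases l <;> simp_all
    subst this
    intro j bl bs cl cs prev _
    simp [pvLoopB, pvSubseq, pvMaxFold]
  | succ n ih =>
    intro l hl j bl bs cl cs prev hprev
    cases l with
    | nil => simp [pvLoopB, pvSubseq, pvMaxFold]
    | cons x xs =>
      by_cases hx : x = "perro" ∨ x = "gato"
      · have hne : prev ≠ some x := hprev x (by simp) hx
        have hc1 : pvRunLen x (x :: xs) = pvRunLen x xs + 1 := by simp [pvRunLen]
        -- A side: one run popped off
        have hA : pvSubseq (x :: xs) j =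
            (j, (pvRunLen x (x :: xs) : Int)) ::
              pvSubseq ((x :: xs).drop (pvRunLen x (x :: xs))) (j + pvRunLen x (x :: xs)) := by
          rcases hx with h | h <;> subst h <;> rw [pvSubseq] <;> simp
        -- B side: first step, then the run lemma
        conv_lhs => rw [pvLoopB]
        rw [if_pos hx, if_neg hne]
        have hrun := pvLoopB_run x hx xs j bl bs 1 (by norm_num)
        have hstep : (if (1 : Int) > bl then pvLoopB xs (j + 1) 1 j 1 j (some x)
              else pvLoopB xs (j + 1) bl bs 1 j (some x)) =
            pvLoopB xs (j + 1) (max bl 1) (if (1 : Int) > bl then j else bs) 1 j (some x) := by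
          by_cases h1 : (1 : Int) > bl
      
          · rw [if_pos h1, if_pos h1, show max bl (1 : Int) = 1 by omega]
          · rw [if_neg h1, if_neg h1, show max bl (1 : Int) = bl by omega]
        rw [hstep, show j + 1 = j + (1 : Int) from rfl, hrun]
        -- apply the induction hypothesis on the dropped suffix
        have hdrop : xs.drop (pvRunLen x xs) = (x :: xs).drop (pvRunLen x (x :: xs)) := by
          rw [hc1]; rfl
        have hlen : (xs.drop (pvRunLen x xs)).length ≤ n := by
          simp only [List.length_drop]
          simp at hl; omega
        have hhead : ∀ w, (xs.drop (pvRunLen x xs)).head? = some w →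
            (w = "perro" ∨ w = "gato") → (some x : Option String) ≠ some w := by
          intro w hw _
          have := pvRunLen_drop_head x xs w hw
          intro h
          exact this (by injection h with h'; exact h'.symm)
        rw [ih (xs.drop (pvRunLen x xs)) hlen _ _ _ _ _ _ hhead]
        rw [hA, pvMaxFold_cons, hdrop]
        have ec : (pvRunLen x (x :: xs) : Int) = 1 + pvRunLen x xs := by
          rw [hc1]; push_cast; ring
        rw [ec, show j + (1 + (pvRunLen x xs : Int)) = j + 1 + pvRunLen x xs by ring]
      · have hA : pvSubseq (x :: xs) j = pvSubseq xs (j + 1) := by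
          push Not at hx
          rw [pvSubseq, if_neg hx.1, if_neg hx.2]
        conv_lhs => rw [pvLoopB]
        rw [if_neg hx]
        have hhead : ∀ w, xs.head? = some w → (w = "perro" ∨ w = "gato") →
            (some x : Option String) ≠ some w := by
          intro w _ hw h
          injection h with h'
          exact hx (h' ▸ hw)
        rw [ih xs (by simp at hl; omega) (j + 1) bl bs 0 cs (some x) hhead, hA]

-- ===== VERDICT (by name: the statement is the Claim_ definition above) =====
theorem subsecuencia_mas_larga_spec : Claim_equal_subsecuencia_mas_larga := by
  intro l _
  unfold Spec_subsecuencia_mas_larga subsecuencia_mas_larga subsecuencia_mas_larga_alt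
  rw [pvMain l.length l (le_refl _) 0 0 0 0 0 none (by simp)]
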